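-- pv_equiv track=rewrite | github.com/turlando/flac-py | flac/encoder.py | prediction_residual
-- ===== SOURCE A (Python) =====
-- from typing import Iterator, Optional, Sequence
--
-- def prediction_residual(
--         samples: list[int],
--         coefficients: Sequence[int],
--         shift: int = 0
-- ) -> list[int]:
--     order = len(coefficients)
--     return [
--         (samples[i]
--          - (sum(samples[i - 1 - j] * c for j, c in enumerate(coefficients))
--             >> shift))
--         for i in range(order, len(samples))
--     ]
-- ===== SOURCE B (Python) =====
-- def prediction_residual(samples, coefficients, shift=0):
--     order = len(coefficients)
--     n = max(0, len(samples) - order)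
--     acc = [0] * n
--     for j, c in enumerate(coefficients):
--         acc = [a + samples[order + idx - 1 - j] * c for idx, a in enumerate(acc)]
--     return [samples[order + idx] - (acc[idx] >> shift) for idx in range(n)]
-- ===== Notes on version B (the rewrite author's own statement) =====
-- stated objective: alternative
-- what changed: Replaces the per-position inner dot product with a tap-major transposed convolution: an accumulator array of partial sums is updated once per coefficient across all output positions, then a second pass shifts and subtracts.
import Mathlib
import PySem

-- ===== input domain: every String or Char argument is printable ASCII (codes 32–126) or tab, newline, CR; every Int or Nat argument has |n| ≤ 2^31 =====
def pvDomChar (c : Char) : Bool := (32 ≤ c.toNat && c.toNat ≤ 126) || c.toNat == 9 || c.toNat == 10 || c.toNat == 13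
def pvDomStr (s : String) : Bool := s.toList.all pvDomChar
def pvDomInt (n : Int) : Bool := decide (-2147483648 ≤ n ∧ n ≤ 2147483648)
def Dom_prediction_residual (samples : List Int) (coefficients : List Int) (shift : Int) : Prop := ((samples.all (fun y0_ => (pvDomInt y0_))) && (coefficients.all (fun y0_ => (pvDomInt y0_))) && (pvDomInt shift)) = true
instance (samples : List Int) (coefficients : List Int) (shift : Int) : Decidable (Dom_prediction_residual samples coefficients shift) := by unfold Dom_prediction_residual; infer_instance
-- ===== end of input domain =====

-- B computes the same residuals by a tap-major transposed convolution (accumulator array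
-- updated once per coefficient, then a second shift-and-subtract pass) instead of an inner
-- dot product per output position; same cost, different decomposition (objective: alternative).

-- ===== PORT A =====
def prediction_residual (samples : List Int) (coefficients : List Int) (shift : Int) : List Int :=
  let order : Int := PySem.List.len coefficients
  (PySem.List.pyRange order (PySem.List.len samples) 1).map (fun i =>
    PySem.List.pyGetD samples i 0
      - (((PySem.List.enumerate coefficients 0).map
            (fun jc => PySem.List.pyGetD samples (i - 1 - jc.1) 0 * jc.2)).sum >>> shift.toNat))

-- ===== PORT B =====
def prediction_residual_alt (samples : List Int) (coefficients : List Int) (shift : Int) : List Int :=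
  let order : Nat := coefficients.length
  let n : Nat := samples.length - order       -- max(0, len(samples) - order): Nat subtraction clamps at 0
  let acc : List Int := (PySem.List.enumerate coefficients 0).foldl
    (fun acc jc => (PySem.List.enumerate acc 0).map
        (fun ia => ia.2 + PySem.List.pyGetD samples ((order : Int) + ia.1 - 1 - jc.1) 0 * jc.2))
    (List.replicate n 0)
  (List.range n).map (fun (idx : Nat) =>
    PySem.List.pyGetD samples ((order : Int) + (idx : Int)) 0 - (acc.getD idx 0 >>> shift.toNat))

-- ===== PRECONDITION & SPEC =====
-- Pre_ excludes exactly the inputs where Python A raises: a negative shift with at least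
-- one residual to produce makes '>> shift' raise ValueError (if no residual is produced the
-- shift is never evaluated and A returns []).
def Pre_prediction_residual (samples : List Int) (coefficients : List Int) (shift : Int) : Prop :=
  0 ≤ shift ∨ samples.length ≤ coefficients.length
instance (samples : List Int) (coefficients : List Int) (shift : Int) : Decidable (Pre_prediction_residual samples coefficients shift) := by unfold Pre_prediction_residual; infer_instance
def pvWitness_prediction_residual : List Int × List Int × Int := ([3, 5, 9, 4], [1, 2], 1)

def Spec_prediction_residual (samples : List Int) (coefficients : List Int) (shift : Int) (out : List Int) : Prop := out = prediction_residual_alt samples coefficients shift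
instance (samples : List Int) (coefficients : List Int) (shift : Int) (out : List Int) : Decidable (Spec_prediction_residual samples coefficients shift out) := by unfold Spec_prediction_residual; infer_instance

-- ===== CLAIM (what is proved, stated in full; the proofs are below) =====
def Claim_equal_prediction_residual : Prop := ∀ (samples : List Int) (coefficients : List Int) (shift : Int), Dom_prediction_residual samples coefficients shift → Pre_prediction_residual samples coefficients shift → Spec_prediction_residual samples coefficients shift (prediction_residual samples coefficients shift)


-- ===== LEMMAS AND PROOFS =====

-- element of the per-tap update pass: position idx picks up samples[order+idx-1-j]*c
theorem enum_map_getD (f : Int × Int → Int) (xs : List Int) :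
    ∀ (s : Int) (idx : Nat), idx < xs.length →
      ((PySem.List.enumerate xs s).map f).getD idx 0 = f (s + idx, xs.getD idx 0) := by
  induction xs with
  | nil => intro s idx h; simp at h
  | cons x xs ih =>
    intro s idx h
    cases idx with
    | zero => simp [PySem.List.enumerate_cons]
    | succ k =>
      have hk : k < xs.length := by simpa using Nat.lt_of_succ_lt_succ h
      have ihk := ih (s + 1) k hk
      simp only [PySem.List.enumerate_cons, List.map_cons, List.getD_cons_succ]
      rw [ihk]
      push_cast
      ring_nf

-- loop invariant of B's tap-major fold: length is preserved and each accumulator cell holds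
-- its starting value plus the dot product of the processed taps at that position
theorem acc_foldl (samples : List Int) (order : Nat) (cs : List Int) :
    ∀ (s : Int) (acc : List Int),
      (((PySem.List.enumerate cs s).foldl
          (fun acc jc => (PySem.List.enumerate acc 0).map
            (fun ia => ia.2 + PySem.List.pyGetD samples ((order : Int) + ia.1 - 1 - jc.1) 0 * jc.2))
          acc).length = acc.length)
      ∧ (∀ idx : Nat, idx < acc.length →
          ((PySem.List.enumerate cs s).foldl
            (fun acc jc => (PySem.List.enumerate acc 0).map
              (fun ia => ia.2 + PySem.List.pyGetD samples ((order : Int) + ia.1 - 1 - jc.1) 0 * jc.2))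
            acc).getD idx 0
          = acc.getD idx 0
            + ((PySem.List.enumerate cs s).map
                (fun jc => PySem.List.pyGetD samples ((order : Int) + (idx : Int) - 1 - jc.1) 0 * jc.2)).sum) := by
  induction cs with
  | nil => intro s acc; simp [PySem.List.enumerate_nil]
  | cons c cs ih =>
    intro s acc
    have hlen : ((PySem.List.enumerate acc 0).map
        (fun ia => ia.2 + PySem.List.pyGetD samples ((order : Int) + ia.1 - 1 - (s, c).1) 0 * (s, c).2)).length = acc.length := by
      simp [PySem.List.length_enumerate]
    obtain ⟨ihl, ihv⟩ := ih (s + 1) ((PySem.List.enumerate acc 0).map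
        (fun ia => ia.2 + PySem.List.pyGetD samples ((order : Int) + ia.1 - 1 - (s, c).1) 0 * (s, c).2))
    constructor
    · simpa [PySem.List.enumerate_cons, hlen] using ihl
    · intro idx h
      have hv := ihv idx (by simpa [hlen] using h)
      have he := enum_map_getD
        (fun ia => ia.2 + PySem.List.pyGetD samples ((order : Int) + ia.1 - 1 - (s, c).1) 0 * (s, c).2)
        acc 0 idx h
      simp only [PySem.List.enumerate_cons, List.foldl_cons, List.map_cons, List.sum_cons] at *
      rw [hv, he]
      simp
      ring

theorem prediction_residual_spec : Claim_equal_prediction_residual := by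
  intro samples coefficients shift _ _
  unfold Spec_prediction_residual prediction_residual prediction_residual_alt
  simp only [PySem.List.len_eq, PySem.List.pyRange_one]
  have hn : ((samples.length : Int) - (coefficients.length : Int)).toNat
      = samples.length - coefficients.length := by omega
  rw [hn, List.map_map]
  apply List.map_congr_left
  intro k hk
  have hk' : k < samples.length - coefficients.length := List.mem_range.mp hk
  obtain ⟨hlen, hval⟩ := acc_foldl samples coefficients.length coefficients 0
    (List.replicate (samples.length - coefficients.length) 0)
  have := hval k (by simpa using hk')
  simp only [Function.comp_apply, this]
  simp
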